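-- pv_equiv track=rewrite | github.com/distributed-systems-co/lida-multiagents-research | tools/agent_name_parser.py | _split_range_payload
-- ===== SOURCE A (Python) =====
-- from typing import Any, Dict, List, Tuple
--
-- def _split_range_payload(payload: str) -> Tuple[str, str, bool]:
--     # Find top-level '..'
--     depth = 0
--     for i in range(len(payload)):
--         c = payload[i]
--         if c == "(":
--             depth += 1
--         elif c == ")":
--             depth -= 1
--         elif c == "." and depth == 0 and payload[i : i + 2] == "..":
--             left = payload[:i]
--             right = payload[i + 2 :]
--             open_end = right.endswith("o")
--             if open_end:
--                 right = right[:-1]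
--             return left, right, open_end
--     # Fallback: treat entire payload as right with empty left
--     return "", payload, False
-- ===== SOURCE B (Python) =====
-- def _split_range_payload(payload):
--     start = 0
--     while True:
--         i = payload.find("..", start)
--         if i == -1:
--             return "", payload, False
--         prefix = payload[:i]
--         if prefix.count("(") - prefix.count(")") == 0:
--             right = payload[i + 2:]
--             if right.endswith("o"):
--                 return prefix, right[:-1], True
--             return prefix, right, False
--         start = i + 1
-- ===== Notes on version B (the rewrite author's own statement) =====
-- stated objective: faster
-- what changed: B replaces A's per-character Python loop carrying a running depth by a substring-search loop: str.find jumps between occurrences of the two-dot separator and each candidate is judged top-level by str.count parenthesis counts of its prefix, moving the scanning into C-level builtins.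
import Mathlib
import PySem

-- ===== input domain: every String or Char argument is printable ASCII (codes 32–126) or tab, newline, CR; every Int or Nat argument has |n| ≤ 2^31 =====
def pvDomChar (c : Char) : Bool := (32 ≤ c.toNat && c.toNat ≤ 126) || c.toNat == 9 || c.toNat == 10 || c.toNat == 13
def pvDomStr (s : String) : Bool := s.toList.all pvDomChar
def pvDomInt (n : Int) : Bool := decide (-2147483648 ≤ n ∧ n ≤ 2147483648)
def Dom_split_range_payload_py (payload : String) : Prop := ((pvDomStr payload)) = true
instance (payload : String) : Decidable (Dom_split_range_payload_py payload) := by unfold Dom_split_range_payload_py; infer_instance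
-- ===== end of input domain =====

-- B replaces A's per-character depth scan by a substring search: jump between '..' occurrences
-- with find('..', start) and decide top-levelness by a paren count of the prefix (alternative decomposition).

-- ===== PORT A =====
-- A's for-loop over indices, carrying the running depth; slices ported with PySem.List.slice.
def goA_split (cs : List Char) (i : Nat) (depth : Int) : String × String × Bool :=
  if h : i < cs.length then
    let c := cs[i]
    if c = '(' then goA_split cs (i+1) (depth+1)
    else if c = ')' then goA_split cs (i+1) (depth-1)
    else if c = '.' ∧ depth = 0 ∧ PySem.List.slice cs (some (i : Int)) (some ((i : Int)+2)) = ['.', '.'] then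
      let left := PySem.List.slice cs none (some (i : Int))
      let right := PySem.List.slice cs (some ((i : Int)+2)) none
      if PySem.Chars.endswith right ['o'] then
        (String.mk left, String.mk (PySem.List.slice right none (some (-1))), true)
      else (String.mk left, String.mk right, false)
    else goA_split cs (i+1) depth
  else ("", String.mk cs, false)
  termination_by cs.length - i

def split_range_payload_py (payload : String) : String × String × Bool :=
  goA_split payload.toList 0 0

-- ===== PORT B =====
-- B's while-loop: i = payload.find('..', start); paren-count test on payload[:i]; else start = i+1.
def goB_split (cs : List Char) (start : Nat) : String × String × Bool :=
  let i := PySem.Chars.findFrom cs ['.', '.'] (start : Int)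
  if hi : i = -1 then ("", String.mk cs, false)
  else
    let prefx := PySem.List.slice cs none (some i)
    if ((PySem.Chars.count prefx ['('] : Int) - (PySem.Chars.count prefx [')'] : Int)) = 0 then
      let right := PySem.List.slice cs (some (i+2)) none
      if PySem.Chars.endswith right ['o'] then
        (String.mk prefx, String.mk (PySem.List.slice right none (some (-1))), true)
      else (String.mk prefx, String.mk right, false)
    else goB_split cs (i.toNat + 1)
  termination_by cs.length + 1 - start
  decreasing_by
    by_cases hle : start ≤ cs.length
    · obtain ⟨h1, h2, -⟩ := PySem.Chars.findFrom_natCast_spec cs ['.', '.'] start hle hi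
      have hlen : (PySem.Chars.findFrom cs ['.', '.'] (start : Int)).toNat + 2 ≤ cs.length := by
        have := h2.length_le
        simp [List.length_drop] at this
        omega
      have h1' : start ≤ (PySem.Chars.findFrom cs ['.', '.'] (start : Int)).toNat := by
        have h0 : (0 : Int) ≤ PySem.Chars.findFrom cs ['.', '.'] (start : Int) :=
          le_trans (Int.natCast_nonneg start) h1
        omega
      omega
    · exfalso
      apply hi
      show PySem.Chars.findFrom cs ['.', '.'] (start : Int) = -1
      simp only [PySem.Chars.findFrom]
      have hlt : (cs.length : Int) < (start : Int) := by
        exact_mod_cast Nat.lt_of_not_le hle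
      rw [if_neg (by omega : ¬ (start : Int) < 0), if_pos (by omega)]

def split_range_payload_py_alt (payload : String) : String × String × Bool :=
  goB_split payload.toList 0

-- ===== PRECONDITION & SPEC =====
def Spec_split_range_payload_py (payload : String) (out : String × String × Bool) : Prop := out = split_range_payload_py_alt payload
instance (payload : String) (out : String × String × Bool) : Decidable (Spec_split_range_payload_py payload out) := by unfold Spec_split_range_payload_py; infer_instance

-- ===== CLAIM (what is proved, stated in full; the proofs are below) =====
def Claim_equal_split_range_payload_py : Prop := ∀ (payload : String), Dom_split_range_payload_py payload → Spec_split_range_payload_py payload (split_range_payload_py payload)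

-- ===== LEMMAS AND PROOFS =====

-- j is a top-level '..' separator position
def pvPidx (cs : List Char) (j : Nat) : Bool :=
  ((cs.drop j).take 2 == ['.', '.']) && ((cs.take j).count '(' == (cs.take j).count ')')

-- first separator position ≥ j
def pvFirstP (cs : List Char) (j : Nat) : Option Nat :=
  if h : j < cs.length then
    if pvPidx cs j then some j else pvFirstP cs (j+1)
  else none
  termination_by cs.length - j

-- the common result at separator position j / the fallback
def pvOutAt (cs : List Char) (j : Nat) : String × String × Bool :=
  let left := PySem.List.slice cs none (some (j : Int))
  let right := PySem.List.slice cs (some ((j : Int)+2)) none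
  if PySem.Chars.endswith right ['o'] then
    (String.mk left, String.mk (PySem.List.slice right none (some (-1))), true)
  else (String.mk left, String.mk right, false)

def pvOutOf (cs : List Char) : Option Nat → String × String × Bool
  | none => ("", String.mk cs, false)
  | some j => pvOutAt cs j

lemma pv_count_go_single (c : Char) : ∀ (fuel : Nat) (l : List Char) (acc : Nat),
    l.length ≤ fuel → PySem.Chars.count.go [c] fuel l acc = acc + l.count c := by
  intro fuel
  induction fuel with
  | zero =>
    intro l acc h
    have : l = [] := List.eq_nil_of_length_eq_zero (by omega)
    subst this
    rfl
  | succ n ih =>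
    intro l acc h
    cases l with
    | nil => rfl
    | cons x t =>
      rw [PySem.Chars.count.go]
      by_cases hx : x = c
      · subst hx
        simp [List.isPrefixOf, ih t (acc+1) (by simpa using Nat.lt_succ_iff.mp (by simpa using h))]
        omega
      · simp [List.isPrefixOf, Ne.symm hx, ih t acc (by simpa using Nat.lt_succ_iff.mp (by simpa using h)), hx]

lemma pv_count_single (l : List Char) (c : Char) : PySem.Chars.count l [c] = l.count c := by
  simp [PySem.Chars.count, pv_count_go_single c l.length l 0 le_rfl]

lemma pv_sep_iff (cs : List Char) (j : Nat) :
    (cs.drop j).take 2 = ['.', '.'] ↔ ['.', '.'] <+: cs.drop j := by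
  rw [List.prefix_iff_eq_take]
  constructor <;> (intro h; exact h.symm)

lemma pv_firstP_none (cs : List Char) : ∀ (n j : Nat), cs.length ≤ j + n →
    (∀ k, j ≤ k → pvPidx cs k = false) → pvFirstP cs j = none := by
  intro n
  induction n with
  | zero =>
    intro j h _
    rw [pvFirstP, dif_neg (by omega)]
  | succ m ih =>
    intro j h hall
    rw [pvFirstP]
    by_cases hj : j < cs.length
    · rw [dif_pos hj, if_neg (by simp [hall j le_rfl])]
      exact ih (j+1) (by omega) (fun k hk => hall k (by omega))
    · rw [dif_neg hj]

lemma pv_firstP_congr (cs : List Char) : ∀ (n s t : Nat), s ≤ t → t ≤ s + n →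
    (∀ k, s ≤ k → k < t → pvPidx cs k = false) → pvFirstP cs s = pvFirstP cs t := by
  intro n
  induction n with
  | zero =>
    intro s t hst hts _
    have : s = t := by omega
    rw [this]
  | succ m ih =>
    intro s t hst hts hall
    by_cases hstt : s = t
    · rw [hstt]
    · have hs : s < t := by omega
      have h1 : pvFirstP cs s = pvFirstP cs (s+1) := by
        rw [pvFirstP]
        by_cases hlen : s < cs.length
        · rw [dif_pos hlen, if_neg (by simp [hall s le_rfl hs])]
        · rw [dif_neg hlen]
          rw [pvFirstP, dif_neg (by omega)]
      rw [h1]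
      exact ih (s+1) t (by omega) (by omega) (fun k hk1 hk2 => hall k (by omega) hk2)

lemma pv_lemA (cs : List Char) : ∀ (n i : Nat) (depth : Int), cs.length ≤ i + n →
    depth = ((cs.take i).count '(' : Int) - ((cs.take i).count ')' : Int) →
    goA_split cs i depth = pvOutOf cs (pvFirstP cs i) := by
  intro n
  induction n with
  | zero =>
    intro i depth h _
    rw [goA_split, dif_neg (by omega), pvFirstP, dif_neg (by omega)]
    rfl
  | succ m ih =>
    intro i depth h hd
    by_cases hi : i < cs.length
    · have hdrop : cs.drop i = cs[i] :: cs.drop (i+1) := List.drop_eq_getElem_cons hi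
      have htake : cs.take (i+1) = cs.take i ++ [cs[i]] := by
        rw [List.take_succ, List.getElem?_eq_getElem hi]
        rfl
      have hcast : ((i : Int)+2) = ((i+2 : Nat) : Int) := by push_cast; ring
      have hslice : PySem.List.slice cs (some (i : Int)) (some ((i : Int)+2)) = (cs.drop i).take 2 := by
        rw [hcast, PySem.List.slice_toNat cs (Int.natCast_nonneg i) (Int.natCast_nonneg (i+2))]
        simp only [Int.toNat_natCast]
        congr 1
        omega
      rw [goA_split, dif_pos hi]
      dsimp only
      by_cases hc1 : cs[i] = '('
      · have hfp : pvFirstP cs i = pvFirstP cs (i+1) := by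
          rw [pvFirstP, dif_pos hi, if_neg (by simp [pvPidx, hdrop, List.take_succ_cons, hc1])]
        rw [if_pos hc1, hfp]
        apply ih (i+1) (depth+1) (by omega)
        rw [hd, htake, hc1]
        generalize cs.take i = l
        simp
        ring
      · by_cases hc2 : cs[i] = ')'
        · have hfp : pvFirstP cs i = pvFirstP cs (i+1) := by
            rw [pvFirstP, dif_pos hi, if_neg (by simp [pvPidx, hdrop, List.take_succ_cons, hc2])]
          rw [if_neg hc1, if_pos hc2, hfp]
          apply ih (i+1) (depth-1) (by omega)
          rw [hd, htake, hc2]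
          generalize cs.take i = l
          simp
          ring
        · by_cases hsep : cs[i] = '.' ∧ depth = 0 ∧
              PySem.List.slice cs (some (i : Int)) (some ((i : Int)+2)) = ['.', '.']
          · have hcounts : (cs.take i).count '(' = (cs.take i).count ')' := by
              have := hd.symm.trans hsep.2.1
              omega
            have hp : pvPidx cs i = true := by
              simp only [pvPidx, hcounts, beq_self_eq_true, Bool.and_true]
              rw [beq_iff_eq, ← hslice]
              exact hsep.2.2
            have hfp : pvFirstP cs i = some i := by
              rw [pvFirstP, dif_pos hi, if_pos hp]
            rw [if_neg hc1, if_neg hc2, if_pos hsep, hfp]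
            rfl
          · rw [if_neg hc1, if_neg hc2, if_neg hsep]
            have hpidx : pvPidx cs i = false := by
              by_cases hdot : cs[i] = '.'
              · simp only [pvPidx, Bool.and_eq_false_iff]
                by_cases hs2 : (cs.drop i).take 2 = ['.', '.']
                · right
                  simp only [beq_eq_false_iff_ne, ne_eq]
                  intro hcounts
                  exact hsep ⟨hdot, by omega, by rw [hslice]; exact hs2⟩
                · left
                  simp [hs2]
              · simp only [pvPidx, Bool.and_eq_false_iff]
                left
                simp only [beq_eq_false_iff_ne, ne_eq]
                rw [hdrop, List.take_succ_cons]
                intro hx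
                have := congrArg List.head? hx
                simp at this
                exact hdot this
            have hfp : pvFirstP cs i = pvFirstP cs (i+1) := by
              rw [pvFirstP, dif_pos hi, if_neg (by simp [hpidx])]
            rw [hfp]
            apply ih (i+1) depth (by omega)
            rw [hd, htake]
            generalize cs.take i = l
            simp [hc1, hc2]
    · rw [goA_split, dif_neg hi, pvFirstP, dif_neg hi]
      rfl

lemma pv_lemB (cs : List Char) : ∀ (n start : Nat), start ≤ cs.length → cs.length ≤ start + n →
    goB_split cs start = pvOutOf cs (pvFirstP cs start) := by
  intro n
  induction n with
  | zero =>
    intro start hle h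
    have hstart : start = cs.length := by omega
    have hfind : PySem.Chars.findFrom cs ['.', '.'] (start : Int) = -1 := by
      rw [PySem.Chars.findFrom_natCast_eq_neg_one_iff cs ['.', '.'] start hle]
      subst hstart
      simp [List.drop_length]
    rw [goB_split]
    dsimp only
    rw [dif_pos hfind, pvFirstP, dif_neg (by omega)]
    rfl
  | succ m ih =>
    intro start hle h
    rw [goB_split]
    dsimp only
    by_cases hfind : PySem.Chars.findFrom cs ['.', '.'] (start : Int) = -1
    · rw [dif_pos hfind]
      rw [pv_firstP_none cs (cs.length - start) start (by omega)]
      · rfl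
      · intro k hk
        rw [PySem.Chars.findFrom_natCast_eq_neg_one_iff cs ['.', '.'] start hle] at hfind
        simp only [pvPidx, Bool.and_eq_false_iff]
        left
        simp only [beq_eq_false_iff_ne, ne_eq]
        intro hs2
        apply hfind
        rw [pv_sep_iff] at hs2
        rw [List.infix_iff_prefix_suffix]
        refine ⟨cs.drop k, hs2, ?_⟩
        have hdd : cs.drop k = (cs.drop start).drop (k - start) := by
          rw [List.drop_drop]
          congr 1
          omega
        rw [hdd]
        exact List.drop_suffix _ _
    · rw [dif_neg hfind]
      obtain ⟨h1, h2, h3⟩ := PySem.Chars.findFrom_natCast_spec cs ['.', '.'] start hle hfind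
      have h0 : (0 : Int) ≤ PySem.Chars.findFrom cs ['.', '.'] (start : Int) :=
        le_trans (Int.natCast_nonneg start) h1
      have hiIk : PySem.Chars.findFrom cs ['.', '.'] (start : Int) =
          ((PySem.Chars.findFrom cs ['.', '.'] (start : Int)).toNat : Int) :=
        (Int.toNat_of_nonneg h0).symm
      generalize hkdef : (PySem.Chars.findFrom cs ['.', '.'] (start : Int)).toNat = k at *
      have hklen : k + 2 ≤ cs.length := by
        have := h2.length_le
        simp at this
        omega
      have hstartk : start ≤ k := by omega
      have hsepk : (cs.drop k).take 2 = ['.', '.'] := (pv_sep_iff cs k).mpr h2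
      rw [hiIk]
      have hprefx : PySem.List.slice cs none (some (k : Int)) = cs.take k := by
        rw [PySem.List.slice_to cs (Int.natCast_nonneg k)]
        simp
      have hcong : pvFirstP cs start = pvFirstP cs k := by
        apply pv_firstP_congr cs (k - start) start k hstartk (by omega)
        intro j hj1 hj2
        simp only [pvPidx, Bool.and_eq_false_iff]
        left
        simp only [beq_eq_false_iff_ne, ne_eq]
        intro hs2
        exact h3 j hj1 hj2 ((pv_sep_iff cs j).mp hs2)
      rw [hcong, hprefx, pv_count_single, pv_count_single]
      by_cases hcounts : (cs.take k).count '(' = (cs.take k).count ')'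
      · have hp : pvPidx cs k = true := by
          simp [pvPidx, hsepk, hcounts]
        have hfp : pvFirstP cs k = some k := by
          rw [pvFirstP, dif_pos (by omega), if_pos hp]
        rw [if_pos (by omega), hfp]
        simp only [pvOutOf, pvOutAt]
        rw [hprefx]
      · have hp : pvPidx cs k = false := by
          simp only [pvPidx, Bool.and_eq_false_iff]
          right
          simp [hcounts]
        have hfp : pvFirstP cs k = pvFirstP cs (k+1) := by
          rw [pvFirstP, dif_pos (by omega), if_neg (by simp [hp])]
        rw [if_neg (by omega), hfp]
        exact ih (k+1) (by omega) (by omega)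

-- ===== VERDICT (by name: the statement is the Claim_ definition above) =====
theorem split_range_payload_py_spec : Claim_equal_split_range_payload_py := by
  intro payload _
  unfold Spec_split_range_payload_py split_range_payload_py split_range_payload_py_alt
  rw [pv_lemA payload.toList payload.toList.length 0 0 (by omega) (by simp),
      pv_lemB payload.toList payload.toList.length 0 (by omega) (by omega)]
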